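-- pv_equiv track=rewrite | github.com/muhammadrakib2299/Python-Intro | leetecode/1461.py | hasAllCodes
-- ===== SOURCE A (Python) =====
-- def hasAllCodes(s: str, k: int) -> bool:
--     # If total possible substrings is larger than string length, impossible
--     if len(s) < k:
--         return False
--
--     needed = 1 << k  # 2^k
--     seen = set()
--
--     for i in range(len(s) - k + 1):
--         substring = s[i:i+k]
--         if substring not in seen:
--             seen.add(substring)
--             needed -= 1
--             if needed == 0:
--                 return True
--
--     return False
-- ===== SOURCE B (Python) =====
-- def hasAllCodes(s: str, k: int) -> bool:
--     n = len(s)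
--     if n < k:
--         return False
--     target = 1 << k
--     if n - k + 1 < target:
--         return False
--     codes = [ord(c) for c in s]
--     h = 0
--     for j in range(k):
--         h = h * 128 + codes[j]
--     top = 128 ** k
--     seen = {h}
--     for i in range(k, n):
--         h = (h * 128 + codes[i]) % top
--         seen.add(h)
--     return len(seen) >= target
-- ===== Notes on version B (the rewrite author's own statement) =====
-- stated objective: faster
-- what changed: A hashes a fresh k-character string slice at every position; B keeps a rolling base-128 integer window (one multiply, add and mod per character) and counts distinct window values in an integer set, comparing the final count to 2^k.
import Mathlib
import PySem

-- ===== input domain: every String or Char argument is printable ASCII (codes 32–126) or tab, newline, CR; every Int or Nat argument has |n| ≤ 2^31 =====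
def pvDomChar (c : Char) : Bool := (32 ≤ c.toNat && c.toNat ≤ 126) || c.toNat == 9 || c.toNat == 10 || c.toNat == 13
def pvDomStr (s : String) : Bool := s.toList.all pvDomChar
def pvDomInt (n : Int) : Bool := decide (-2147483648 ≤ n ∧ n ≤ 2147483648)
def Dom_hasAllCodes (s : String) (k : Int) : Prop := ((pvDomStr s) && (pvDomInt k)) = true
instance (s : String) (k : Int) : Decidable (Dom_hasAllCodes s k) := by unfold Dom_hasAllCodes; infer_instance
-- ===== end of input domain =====

-- B replaces A's per-window string slicing + string set with a rolling base-128 integer window and an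
-- integer set (objective: faster, constant-factor — no k-char slice/hash per position).

-- ===== PORT A =====
def hasAllCodes (s : String) (k : Int) : Bool :=
  if PySem.Str.len s < k then false
  else
    let needed : Int := (1 : Int) <<< k.toNat
    let r := (PySem.List.pyRange 0 (PySem.Str.len s - k + 1)).foldl
      (fun (st : PySem.Set (List Char) × Int × Bool) i =>
        if st.2.2 then st
        else
          let sub := PySem.List.slice s.toList (some i) (some (i + k))
          if PySem.Set.contains st.1 sub then st
          else
            let nd := st.2.1 - 1
            (PySem.Set.add st.1 sub, nd, nd == 0))
      (PySem.Set.empty, needed, false)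
    r.2.2

-- ===== PORT B =====
def hasAllCodes_alt (s : String) (k : Int) : Bool :=
  let n := PySem.Str.len s
  if n < k then false
  else
    let target : Int := (1 : Int) <<< k.toNat
    if n - k + 1 < target then false
    else
    let codes : List Int := s.toList.map (fun c => (c.toNat : Int))
    let h0 : Int := (PySem.List.pyRange 0 k).foldl
      (fun h j => h * 128 + PySem.List.pyGetD codes j 0) 0
    let top : Int := 128 ^ k.toNat
    let r := (PySem.List.pyRange k n).foldl
      (fun (st : Int × PySem.Set Int) i =>
        let h := PySem.Int.mod (st.1 * 128 + PySem.List.pyGetD codes i 0) top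
        (h, PySem.Set.add st.2 h))
      (h0, PySem.Set.add PySem.Set.empty h0)
    decide (PySem.Set.len r.2 ≥ target)

-- ===== PRECONDITION & SPEC =====
-- Pre_ excludes exactly k < 0, where Python A raises ValueError at '1 << k' (negative shift count).
def Pre_hasAllCodes (s : String) (k : Int) : Prop := 0 ≤ k
instance (s : String) (k : Int) : Decidable (Pre_hasAllCodes s k) := by unfold Pre_hasAllCodes; infer_instance
def pvWitness_hasAllCodes : String × Int := ("0110", 1)
def Spec_hasAllCodes (s : String) (k : Int) (out : Bool) : Prop := out = hasAllCodes_alt s k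
instance (s : String) (k : Int) (out : Bool) : Decidable (Spec_hasAllCodes s k out) := by unfold Spec_hasAllCodes; infer_instance

-- ===== CLAIM (what is proved, stated in full; the proofs are below) =====
def Claim_equal_hasAllCodes : Prop := ∀ (s : String) (k : Int), Dom_hasAllCodes s k → Pre_hasAllCodes s k → Spec_hasAllCodes s k (hasAllCodes s k)

-- ===== LEMMAS AND PROOFS =====

-- base-128 encoding of a character window
def encC (l : List Char) : Int := l.foldl (fun h c => h * 128 + (c.toNat : Int)) 0

-- the window of length K starting at position i
def win (cs : List Char) (K i : Nat) : List Char := (cs.drop i).take K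

-- A's loop body, with the slice abstracted to the window it produces
def stepA (st : PySem.Set (List Char) × Int × Bool) (w : List Char) :
    PySem.Set (List Char) × Int × Bool :=
  if st.2.2 then st
  else if PySem.Set.contains st.1 w then st
  else (PySem.Set.add st.1 w, st.2.1 - 1, st.2.1 - 1 == 0)

-- B's loop body on the incoming code
def stepB (top : Int) (st : Int × PySem.Set Int) (c : Int) : Int × PySem.Set Int :=
  (PySem.Int.mod (st.1 * 128 + c) top,
   PySem.Set.add st.2 (PySem.Int.mod (st.1 * 128 + c) top))

theorem encC_from (t : List Char) : ∀ h : Int,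
    t.foldl (fun h c => h * 128 + (c.toNat : Int)) h = h * 128 ^ t.length + encC t := by
  induction t with
  | nil => intro h; simp [encC]
  | cons c t ih =>
    intro h
    have h1 := ih (h * 128 + (c.toNat : Int))
    have h2 := ih ((0 : Int) * 128 + (c.toNat : Int))
    simp only [List.foldl_cons, List.length_cons, encC] at *
    rw [h1, h2]; ring

theorem encC_nonneg (l : List Char) : 0 ≤ encC l := by
  induction l with
  | nil => simp [encC]
  | cons c t ih =>
    have h := encC_from t ((0 : Int) * 128 + (c.toNat : Int))
    simp only [encC, List.foldl_cons] at *
    rw [h]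
    have : (0:Int) ≤ 128 ^ t.length := by positivity
    positivity

theorem encC_lt (l : List Char) (h : ∀ c ∈ l, c.toNat < 128) :
    encC l < 128 ^ l.length := by
  induction l with
  | nil => simp [encC]
  | cons c t ih =>
    have hf := encC_from t ((0 : Int) * 128 + (c.toNat : Int))
    have ht : encC t < 128 ^ t.length := ih (fun x hx => h x (List.mem_cons_of_mem _ hx))
    have hc : ((c.toNat : Int)) < 128 := by exact_mod_cast h c (List.mem_cons_self ..)
    have h0 : (0:Int) ≤ encC t := encC_nonneg t
    have hp : (0:Int) < 128 ^ t.length := by positivity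
    simp only [encC, List.foldl_cons, List.length_cons] at *
    rw [hf]
    have hm : ((c.toNat : Int)) * 128 ^ t.length ≤ 127 * 128 ^ t.length := by
      apply mul_le_mul_of_nonneg_right (by omega) (le_of_lt hp)
    rw [pow_succ]
    nlinarith [ht, h0, hp, hm]

theorem encC_append_singleton (l : List Char) (c : Char) :
    encC (l ++ [c]) = encC l * 128 + (c.toNat : Int) := by
  simp [encC, List.foldl_append]

theorem encC_inj : ∀ (u v : List Char), u.length = v.length →
    (∀ c ∈ u, c.toNat < 128) → (∀ c ∈ v, c.toNat < 128) →
    encC u = encC v → u = v := by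
  intro u
  induction u using List.reverseRecOn with
  | nil => intro v hlen _ _ _; exact (List.length_eq_zero_iff.mp hlen.symm).symm ▸ rfl
  | append_singleton u a ih =>
    intro v hlen hu hv he
    induction v using List.reverseRecOn with
    | nil => simp at hlen
    | append_singleton v b _ =>
      simp only [List.length_append, List.length_singleton] at hlen
      rw [encC_append_singleton, encC_append_singleton] at he
      have ha : a.toNat < 128 := hu a (by simp)
      have hb : b.toNat < 128 := hv b (by simp)
      have ha' : ((a.toNat : Int)) < 128 := by exact_mod_cast ha
      have hb' : ((b.toNat : Int)) < 128 := by exact_mod_cast hb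
      have hab : (a.toNat : Int) = (b.toNat : Int) ∧ encC u = encC v := by
        constructor <;> omega
      have hchar : a = b := by
        apply Char.ext; apply UInt32.toNat_inj.mp; exact_mod_cast hab.1
      have huv : u = v := ih v (by omega) (fun c hc => hu c (by simp [hc]))
        (fun c hc => hv c (by simp [hc])) hab.2
      rw [huv, hchar]

theorem roll (cs : List Char) (K j : Nat) (hch : ∀ c ∈ cs, c.toNat < 128)
    (h : j + K < cs.length) :
    PySem.Int.mod (encC (win cs K j) * 128 + ((cs[j + K]'h).toNat : Int)) (128 ^ K)
      = encC (win cs K (j + 1)) := by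
  have hpos : (0:Int) < 128 ^ K := by positivity
  rcases Nat.eq_zero_or_pos K with hK | hK
  · subst hK
    simp only [win, List.take_zero, encC, List.foldl_nil, pow_zero]
    have h1 := PySem.Int.mod_nonneg (0 * 128 + ((cs[j + 0]'h).toNat : Int)) (by norm_num : (0:Int) < 1)
    have h2 := PySem.Int.mod_lt (0 * 128 + ((cs[j + 0]'h).toNat : Int)) (by norm_num : (0:Int) < 1)
    omega
  · -- K ≥ 1
    obtain ⟨K', rfl⟩ : ∃ K', K = K' + 1 := ⟨K - 1, by omega⟩
    have hj : j < cs.length := by omega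
    have hw : win cs (K' + 1) j = cs[j] :: (cs.drop (j+1)).take K' := by
      rw [win, List.drop_eq_getElem_cons hj, List.take_succ_cons]
    have hlen' : ((cs.drop (j+1)).take K').length = K' := by
      simp [List.length_take, List.length_drop]; omega
    have hwin1 : win cs (K' + 1) (j + 1) = (cs.drop (j+1)).take K' ++ [cs[j + (K' + 1)]'h] := by
      rw [win, List.take_add_one]
      congr 1
      have hK'lt : K' < (cs.drop (j+1)).length := by simp [List.length_drop]; omega
      rw [List.getElem?_eq_getElem hK'lt]
      simp [List.getElem_drop]
      congr 1
      omega
    have hE : encC (win cs (K' + 1) j)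
        = (cs[j].toNat : Int) * 128 ^ K' + encC ((cs.drop (j+1)).take K') := by
      rw [hw]
      show List.foldl _ 0 _ = _
      rw [List.foldl_cons]
      rw [encC_from]
      rw [hlen']
      ring
    have hE1 : encC (win cs (K' + 1) (j + 1))
        = encC ((cs.drop (j+1)).take K') * 128 + ((cs[j + (K' + 1)]'h).toNat : Int) := by
      rw [hwin1, encC_append_singleton]
    have hbound : 0 ≤ encC (win cs (K' + 1) (j + 1)) ∧
        encC (win cs (K' + 1) (j + 1)) < 128 ^ (K' + 1) := by
      constructor
      · exact encC_nonneg _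
      · have := encC_lt (win cs (K' + 1) (j + 1))
          (fun c hc => by
            simp only [win] at hc
            exact hch c (List.mem_of_mem_drop (List.mem_of_mem_take hc)))
        have hlw : (win cs (K' + 1) (j + 1)).length = K' + 1 := by
          simp [win, List.length_take, List.length_drop]; omega
        rw [hlw] at this
        exact this
    have harith : encC (win cs (K' + 1) j) * 128 + ((cs[j + (K' + 1)]'h).toNat : Int)
        = encC (win cs (K' + 1) (j + 1)) + 128 ^ (K' + 1) * (cs[j].toNat : Int) := by
      rw [hE, hE1]; ring
    rw [harith, PySem.Int.mod_eq_emod_of_pos hpos, Int.add_mul_emod_self_left,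
      Int.emod_eq_of_lt hbound.1 hbound.2]

theorem length_add_ge {α : Type} [BEq α] (s : PySem.Set α) (x : α) :
    s.length ≤ (PySem.Set.add s x).length := by
  simp only [PySem.Set.add]
  split <;> simp

theorem length_update_ge {α : Type} [BEq α] (l : List α) :
    ∀ s : PySem.Set α, s.length ≤ (PySem.Set.update s l).length := by
  induction l with
  | nil => intro s; simp [PySem.Set.update]
  | cons x l ih =>
    intro s
    calc s.length ≤ (PySem.Set.add s x).length := length_add_ge s x
      _ ≤ _ := ih (PySem.Set.add s x)

theorem foldA_done (ws : List (List Char)) (st : PySem.Set (List Char) × Int × Bool)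
    (h : st.2.2 = true) : ws.foldl stepA st = st := by
  induction ws with
  | nil => rfl
  | cons w ws ih => simp only [List.foldl_cons, stepA, h, if_pos]; exact ih

theorem foldA_spec (T : Int) : ∀ (ws : List (List Char)) (seen : PySem.Set (List Char)),
    (seen.length : Int) < T →
    (ws.foldl stepA (seen, T - seen.length, false)).2.2
      = decide (T ≤ ((PySem.Set.update seen ws).length : Int)) := by
  intro ws
  induction ws with
  | nil =>
    intro seen hlt
    simp only [List.foldl_nil, PySem.Set.update]
    rw [eq_comm, decide_eq_false_iff_not]
    omega
  | cons w ws ih =>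
    intro seen hlt
    simp only [List.foldl_cons, stepA]
    rw [if_neg (by simp)]
    by_cases hm : w ∈ seen
    · have hc : PySem.Set.contains seen w = true := by
        simp [PySem.Set.contains, hm]
      rw [if_pos hc]
      have hadd : PySem.Set.add seen w = seen := by
        simp [PySem.Set.add, PySem.Set.contains, hm]
      rw [ih seen hlt]
      simp only [PySem.Set.update, List.foldl_cons, hadd]
      rfl
    · rw [if_neg (by simp [PySem.Set.contains, hm])]
      have hadd : PySem.Set.add seen w = seen ++ [w] := by
        simp [PySem.Set.add, PySem.Set.contains, hm]
      by_cases hz : T - (seen.length : Int) - 1 = 0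
      · have hbeq : (T - (seen.length : Int) - 1 == 0) = true := by simpa using hz
        rw [hbeq]
        rw [foldA_done ws _ rfl]
        have hupd : ((seen ++ [w]).length : Int)
            ≤ ((PySem.Set.update (seen ++ [w]) ws).length : Int) := by
          exact_mod_cast length_update_ge ws (seen ++ [w])
        have hgoal : T ≤ ((PySem.Set.update seen (w :: ws)).length : Int) := by
          simp only [PySem.Set.update, List.foldl_cons, hadd]
          simp only [PySem.Set.update] at hupd
          simp only [List.length_append, List.length_singleton] at hupd ⊢
          push_cast at hupd ⊢
          omega
        rw [eq_comm, decide_eq_true_eq]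
        simpa only [PySem.Set.update, List.foldl_cons] using hgoal
      · have hbeq : (T - (seen.length : Int) - 1 == 0) = false := by simpa using hz
        rw [hbeq]
        have hlt' : ((seen ++ [w]).length : Int) < T := by
          simp only [List.length_append, List.length_singleton]
          push_cast
          omega
        have harg : T - ((seen.length : Int)) - 1 = T - (((seen ++ [w]).length : Int)) := by
          simp only [List.length_append, List.length_singleton]
          push_cast
          ring
        rw [hadd, harg, ih (seen ++ [w]) hlt']
        simp only [PySem.Set.update, List.foldl_cons, hadd]
        rfl

theorem foldB_inv (cs : List Char) (K : Nat) (hch : ∀ c ∈ cs, c.toNat < 128) :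
    ∀ (m j : Nat), j + K + m = cs.length → ∀ seen : PySem.Set Int,
    ((cs.drop (j + K)).foldl (fun st c => stepB (128 ^ K) st ((c.toNat : Int)))
        (encC (win cs K j), seen)).2
      = PySem.Set.update seen ((List.range' (j + 1) m).map (fun i => encC (win cs K i))) := by
  intro m
  induction m with
  | zero =>
    intro j hj seen
    rw [List.drop_eq_nil_of_le (by omega)]
    simp [PySem.Set.update]
  | succ m ih =>
    intro j hj seen
    have hlt : j + K < cs.length := by omega
    rw [List.drop_eq_getElem_cons hlt]
    simp only [List.foldl_cons]
    have hstep : stepB (128 ^ K) (encC (win cs K j), seen) ((cs[j + K]'hlt).toNat : Int)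
        = (encC (win cs K (j + 1)), PySem.Set.add seen (encC (win cs K (j + 1)))) := by
      simp only [stepB]
      rw [roll cs K j hch hlt]
    rw [hstep]
    have : j + K + 1 = (j + 1) + K := by omega
    rw [this]
    rw [ih (j + 1) (by omega) (PySem.Set.add seen (encC (win cs K (j + 1))))]
    rw [List.range'_succ]
    simp [PySem.Set.update]

theorem update_map_inj {α β : Type} [BEq α] [LawfulBEq α] [BEq β] [LawfulBEq β] (f : α → β) :
    ∀ (l acc : List α),
    (∀ a b : α, (a ∈ acc ∨ a ∈ l) → (b ∈ acc ∨ b ∈ l) → f a = f b → a = b) →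
    PySem.Set.update (acc.map f) (l.map f) = (PySem.Set.update acc l).map f := by
  intro l
  induction l with
  | nil => intro acc _; simp [PySem.Set.update]
  | cons x l ih =>
    intro acc hinj
    simp only [List.map_cons, PySem.Set.update, List.foldl_cons]
    have hadd : PySem.Set.add (acc.map f) (f x) = (PySem.Set.add acc x).map f := by
      by_cases hm : x ∈ acc
      · have h1 : PySem.Set.contains acc x = true := by
          simp [PySem.Set.contains, hm]
        have h2 : PySem.Set.contains (acc.map f) (f x) = true := by
          simp only [PySem.Set.contains]
          exact List.contains_iff_mem.mpr (List.mem_map_of_mem hm)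
        simp only [PySem.Set.contains] at h2
        simp only [PySem.Set.contains] at h1
        simp only [PySem.Set.add, PySem.Set.contains]
        rw [if_pos h2, if_pos h1]
      · have h1 : PySem.Set.contains acc x = false := by
          simp [PySem.Set.contains, hm]
        have h2 : PySem.Set.contains (acc.map f) (f x) = false := by
          simp only [PySem.Set.contains]
          rw [Bool.eq_false_iff]
          intro hcon
          have hmem := List.contains_iff_mem.mp hcon
          rw [List.mem_map] at hmem
          obtain ⟨a, ha, hfa⟩ := hmem
          exact hm (hinj a x (Or.inl ha) (Or.inr (List.mem_cons_self ..)) hfa ▸ ha)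
        simp only [PySem.Set.contains] at h2
        simp only [PySem.Set.contains] at h1
        simp only [PySem.Set.add, PySem.Set.contains]
        rw [if_neg (by simp only [h2]; simp), if_neg (by simp only [h1]; simp), List.map_append, List.map_singleton]
    rw [hadd]
    have := ih (PySem.Set.add acc x) (by
      intro a b haa hbb hfab
      apply hinj a b
      · rcases haa with haa | haa
        · rcases (PySem.Set.mem_add acc x a).mp haa with h | h
          · exact Or.inl h
          · exact Or.inr (h ▸ List.mem_cons_self ..)
        · exact Or.inr (List.mem_cons_of_mem _ haa)
      · rcases hbb with hbb | hbb
        · rcases (PySem.Set.mem_add acc x b).mp hbb with h | h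
          · exact Or.inl h
          · exact Or.inr (h ▸ List.mem_cons_self ..)
        · exact Or.inr (List.mem_cons_of_mem _ hbb)
      · exact hfab)
    simpa [PySem.Set.update] using this

-- window helper facts
theorem win_length (cs : List Char) (K i : Nat) (h : i + K ≤ cs.length) :
    (win cs K i).length = K := by
  simp [win, List.length_take, List.length_drop]; omega

theorem mem_of_mem_win (cs : List Char) (K i : Nat) (c : Char) (h : c ∈ win cs K i) :
    c ∈ cs := by
  simp only [win] at h
  exact List.mem_of_mem_drop (List.mem_of_mem_take h)

-- ===== VERDICT (by name: the statement is the Claim_ definition above) =====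
theorem hasAllCodes_spec : Claim_equal_hasAllCodes := by
  unfold Claim_equal_hasAllCodes
  intro s k hdom hpre
  unfold Spec_hasAllCodes hasAllCodes hasAllCodes_alt
  by_cases hnk : PySem.Str.len s < k
  · rw [if_pos hnk, if_pos hnk]
  · rw [if_neg hnk, if_neg hnk]
    -- notation
    have hk : k = ((k.toNat : Nat) : Int) := (Int.toNat_of_nonneg hpre).symm
    set cs := s.toList with hcs
    set K := k.toNat with hK
    set n := cs.length with hn
    have hlen : PySem.Str.len s = (n : Int) := PySem.Str.len_eq s
    have hKn : K ≤ n := by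
      rw [hlen, hk] at hnk
      exact_mod_cast not_lt.mp hnk
    -- character bound from the domain
    have hch : ∀ c ∈ cs, c.toNat < 128 := by
      intro c hc
      have h1 : pvDomStr s = true := by
        unfold Dom_hasAllCodes at hdom
        exact (Bool.and_eq_true _ _ |>.mp hdom).1
      have h2 : pvDomChar c = true := by
        unfold pvDomStr at h1
        rw [List.all_eq_true] at h1
        exact h1 c hc
      unfold pvDomChar at h2
      simp only [Bool.or_eq_true, Bool.and_eq_true, decide_eq_true_eq, beq_iff_eq] at h2
      omega
    have hT : ((1 : Int) <<< K) = 2 ^ K := by rw [Int.shiftLeft_eq, one_mul]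
    have hTpos : (0 : Int) < 2 ^ K := by positivity
    set M := n - K + 1 with hM
    -- ===== A side =====
    have hbound : PySem.Str.len s - k + 1 = ((M : Nat) : Int) := by
      rw [hlen, hk, hM]; push_cast; omega
    have hA : ((PySem.List.pyRange 0 (PySem.Str.len s - k + 1)).foldl
        (fun (st : PySem.Set (List Char) × Int × Bool) i =>
          if st.2.2 then st
          else
            let sub := PySem.List.slice s.toList (some i) (some (i + k))
            if PySem.Set.contains st.1 sub then st
            else
              let nd := st.2.1 - 1
              (PySem.Set.add st.1 sub, nd, nd == 0))
        (PySem.Set.empty, (2 ^ K : Int), false)).2.2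
        = decide ((2 ^ K : Int) ≤ (((PySem.Set.ofList ((List.range M).map (win cs K))).length : Nat) : Int)) := by
      rw [hbound, PySem.List.pyRange_zero_natCast, List.foldl_map]
      rw [PySem.List.foldl_congr_mem _ _
        (fun (st : PySem.Set (List Char) × Int × Bool) (i : Nat) => stepA st (win cs K i)) _
        (by
          intro st i hi
          have hslice : PySem.List.slice s.toList (some ((i : Nat) : Int)) (some (((i : Nat) : Int) + k))
              = win cs K i := by
            rw [hk]
            rw [PySem.List.slice_natCast_add]
            rfl
          simp only [hslice, stepA])]
      rw [← List.foldl_map (f := win cs K) (g := stepA)]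
      have hinit : ((PySem.Set.empty : PySem.Set (List Char)), (2 ^ K : Int), false)
          = ((PySem.Set.empty : PySem.Set (List Char)),
             (2 ^ K : Int) - (((PySem.Set.empty : PySem.Set (List Char)).length : Nat) : Int), false) := by
        simp [PySem.Set.empty]
      rw [hinit, foldA_spec (2 ^ K) ((List.range M).map (win cs K)) PySem.Set.empty
        (by simp only [PySem.Set.empty, List.length_nil, Nat.cast_zero]; exact hTpos)]
      rw [PySem.Set.ofList_eq_foldl]
      rfl
    -- ===== B side =====
    set codes : List Int := s.toList.map (fun c => ((c.toNat : Nat) : Int)) with hcodes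
    have hcodlen : PySem.List.len codes = (n : Int) := by
      have hcl : codes.length = n := by rw [hcodes, List.length_map, hn, hcs]
      simp [PySem.List.len, hcl]
    -- h0 computes the encoding of the first window
    have hh0 : ((PySem.List.pyRange 0 k).foldl
        (fun h j => h * 128 + PySem.List.pyGetD codes j 0) 0) = encC (win cs K 0) := by
      have htk : PySem.List.len (codes.take K) = k := by
        have hsl : s.toList.length = n := by rw [hn, hcs]
        have hlt : (codes.take K).length = K := by
          rw [List.length_take, hcodes, List.length_map]
          omega
        show (((codes.take K).length : Nat) : Int) = k
        rw [hlt, hk]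
      rw [PySem.List.foldl_congr_mem _ _
        (fun (h : Int) (j : Int) => h * 128 + PySem.List.pyGetD (codes.take K) j 0) _
        (by
          intro acc j hj
          have hjr := PySem.List.mem_pyRange_one.mp hj
          have hj0 : 0 ≤ j := hjr.1
          have hjk : j < (K : Int) := by rw [hk] at hjr; exact_mod_cast hjr.2
          have hjn : j.toNat < K := by omega
          have hjcast : j = ((j.toNat : Nat) : Int) := (Int.toNat_of_nonneg hj0).symm
          rw [hjcast]
          show acc * 128 + PySem.List.pyGetD codes ((j.toNat : Nat) : Int) 0
              = acc * 128 + PySem.List.pyGetD (codes.take K) ((j.toNat : Nat) : Int) 0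
          rw [PySem.List.pyGetD_natCast, PySem.List.pyGetD_natCast]
          congr 1
          unfold List.getD
          rw [List.getElem?_take_of_lt hjn])]
      rw [← htk, PySem.List.foldl_pyRange_pyGetD (codes.take K) 0 _ 0 le_rfl]
      simp only [Int.toNat_zero, List.drop_zero]
      rw [← List.map_take]
      rw [List.foldl_map]
      simp only [win, List.drop_zero, encC]
      rfl
    -- the rolling loop
    have hB : ((PySem.List.pyRange k (PySem.Str.len s)).foldl
        (fun (st : Int × PySem.Set Int) i =>
          let h := PySem.Int.mod (st.1 * 128 + PySem.List.pyGetD codes i 0) (128 ^ K)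
          (h, PySem.Set.add st.2 h))
        (encC (win cs K 0), PySem.Set.add PySem.Set.empty (encC (win cs K 0)))).2
        = PySem.Set.ofList (((List.range M).map (win cs K)).map encC) := by
      rw [hlen, ← hcodlen]
      show (List.foldl
          (fun (st : Int × PySem.Set Int) i => stepB (128 ^ K) st (PySem.List.pyGetD codes i 0))
          (encC (win cs K 0), PySem.Set.add PySem.Set.empty (encC (win cs K 0)))
          (PySem.List.pyRange k (PySem.List.len codes))).2
        = PySem.Set.ofList (((List.range M).map (win cs K)).map encC)
      rw [PySem.List.foldl_pyRange_pyGetD codes 0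
        (fun (st : Int × PySem.Set Int) c => stepB (128 ^ K) st c) _ hpre]
      rw [hcodes, ← List.map_drop, List.foldl_map]
      have h0K : (0 : Nat) + K = K := by omega
      have hinv := foldB_inv cs K hch (n - K) 0 (by omega)
        (PySem.Set.add PySem.Set.empty (encC (win cs K 0)))
      rw [h0K] at hinv
      have hdropeq : List.drop k.toNat s.toList = List.drop K cs := rfl
      rw [hdropeq, hinv]
      have hrange : (List.range M).map (win cs K)
          = win cs K 0 :: (List.range' 1 (n - K)).map (win cs K) := by
        rw [List.range_eq_range', hM]
        rw [List.range'_succ]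
        simp
      rw [hrange]
      simp only [List.map_cons, PySem.Set.ofList_eq_foldl, List.foldl_cons]
      have hemp : PySem.Set.add ([] : PySem.Set Int) (encC (win cs K 0))
          = PySem.Set.add PySem.Set.empty (encC (win cs K 0)) := rfl
      rw [hemp]
      simp only [PySem.Set.update, List.map_map]
      rfl
    -- ===== cardinalities agree =====
    have hinj : PySem.Set.ofList (((List.range M).map (win cs K)).map encC)
        = (PySem.Set.ofList ((List.range M).map (win cs K))).map encC := by
      have := update_map_inj encC ((List.range M).map (win cs K)) [] (by
        intro a b ha hb hab
        have hmema : a ∈ (List.range M).map (win cs K) := by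
          rcases ha with h | h
          · simp at h
          · exact h
        have hmemb : b ∈ (List.range M).map (win cs K) := by
          rcases hb with h | h
          · simp at h
          · exact h
        obtain ⟨i, hi, rfl⟩ := List.mem_map.mp hmema
        obtain ⟨i', hi', rfl⟩ := List.mem_map.mp hmemb
        have hiM : i < M := List.mem_range.mp hi
        have hiM' : i' < M := List.mem_range.mp hi'
        apply encC_inj _ _ _ _ _ hab
        · rw [win_length cs K i (by omega), win_length cs K i' (by omega)]
        · exact fun c hc => hch c (mem_of_mem_win cs K i c hc)
        · exact fun c hc => hch c (mem_of_mem_win cs K i' c hc))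
      simpa [PySem.Set.update, PySem.Set.ofList_eq_foldl] using this
    -- ===== assemble =====
    have hBside : decide (PySem.Set.len
        (((PySem.List.pyRange k (PySem.Str.len s)).foldl
          (fun (st : Int × PySem.Set Int) i =>
            let h := PySem.Int.mod (st.1 * 128 + PySem.List.pyGetD codes i 0) (128 ^ K)
            (h, PySem.Set.add st.2 h))
          (encC (win cs K 0), PySem.Set.add PySem.Set.empty (encC (win cs K 0)))).2)
        ≥ (2 ^ K : Int))
        = decide ((2 ^ K : Int) ≤ (((PySem.Set.ofList ((List.range M).map (win cs K))).length : Nat) : Int)) := by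
      rw [hB, hinj]
      simp only [PySem.Set.len, List.length_map, ge_iff_le]
    rw [← hh0] at hBside
    rw [hT]
    show _ = if PySem.Str.len s - k + 1 < (2 ^ K : Int) then false else _
    by_cases hsmall : PySem.Str.len s - k + 1 < (2 ^ K : Int)
    · rw [if_pos hsmall]
      refine hA.trans ?_
      rw [decide_eq_false_iff_not, not_le]
      have hle : (PySem.Set.ofList ((List.range M).map (win cs K))).length
          ≤ ((List.range M).map (win cs K)).length := PySem.Set.length_ofList_le _
      rw [List.length_map, List.length_range] at hle
      rw [hbound] at hsmall
      have : ((PySem.Set.ofList ((List.range M).map (win cs K))).length : Int) ≤ (M : Int) := by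
        exact_mod_cast hle
      omega
    · rw [if_neg hsmall]
      exact hA.trans hBside.symm
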